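-- pv_equiv track=rewrite | github.com/nkukarl/lintcode | Q42 Maximum Subarray II.py | helper
-- ===== SOURCE A (Python) =====
-- def helper(nums):
-- 	res = [nums[0]]
-- 	cur = max(nums[0], 0)
-- 	for n in nums[1:]:
-- 		cur += n
-- 		if cur < 0:
-- 			cur = 0
-- 			res.append(max(n, res[-1]))
-- 		else:
-- 			res.append(max(cur, res[-1]))
-- 	return res
-- ===== SOURCE B (Python) =====
-- def helper(nums):
-- 	res = []
-- 	best = None
-- 	prefix = 0
-- 	min_prefix = 0
-- 	for n in nums:
-- 		prefix += n
-- 		ending = prefix - min_prefix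
-- 		best = ending if best is None else max(best, ending)
-- 		res.append(best)
-- 		if prefix < min_prefix:
-- 			min_prefix = prefix
-- 	return res
-- ===== Notes on version B (the rewrite author's own statement) =====
-- stated objective: alternative
-- what changed: B tracks the running prefix sum and its historical minimum (best ending = prefix - min_prefix) with a best-so-far accumulator, instead of A's zero-clamped Kadane running sum with res[-1] lookups.
-- crash fix: On the empty list A raises IndexError (it reads nums[0] before looping); B returns []. — e.g. on helper([]): A raises IndexError, B returns []
import Mathlib
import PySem

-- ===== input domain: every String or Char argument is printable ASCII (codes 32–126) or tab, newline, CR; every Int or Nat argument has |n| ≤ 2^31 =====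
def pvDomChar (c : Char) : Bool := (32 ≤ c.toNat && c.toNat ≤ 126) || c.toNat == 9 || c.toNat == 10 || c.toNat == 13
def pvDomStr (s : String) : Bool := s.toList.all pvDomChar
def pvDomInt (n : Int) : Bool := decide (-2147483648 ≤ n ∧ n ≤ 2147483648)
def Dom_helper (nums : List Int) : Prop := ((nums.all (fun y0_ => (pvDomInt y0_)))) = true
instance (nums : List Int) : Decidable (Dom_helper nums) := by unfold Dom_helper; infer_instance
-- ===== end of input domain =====

-- B replaces A's zero-clamped running sum (Kadane with res[-1] lookups) by a prefix-sum /
-- historical-minimum-prefix invariant with a best-so-far accumulator; alternative decomposition, same O(n) cost.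
-- A raises IndexError on the empty list (nums[0]); B returns [] there (see Raises_helper).

-- ===== PORT A =====
-- res is kept in reverse (head = Python's res[-1]) and reversed once at the end.
def helperStep (st : List Int × Int) (n : Int) : List Int × Int :=
  let cur := st.2 + n
  if cur < 0 then (max n st.1.head! :: st.1, 0)
  else (max cur st.1.head! :: st.1, cur)

def helper (nums : List Int) : List Int :=
  match nums with
  | [] => []   -- Python raises IndexError here (nums[0]); excluded by Pre_helper
  | x :: rest => (rest.foldl helperStep ([x], max x 0)).1.reverse

-- ===== PORT B =====
-- state = (res reversed, best so far (None before first element), prefix sum, min prefix sum)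
def helperAltStep (st : List Int × Option Int × Int × Int) (n : Int) : List Int × Option Int × Int × Int :=
  let pfx := st.2.2.1 + n
  let ending := pfx - st.2.2.2
  let best := match st.2.1 with | none => ending | some b => max b ending
  let minPfx := if pfx < st.2.2.2 then pfx else st.2.2.2
  (best :: st.1, some best, pfx, minPfx)

def helper_alt (nums : List Int) : List Int :=
  (nums.foldl helperAltStep ([], none, 0, 0)).1.reverse

-- ===== PRECONDITION & SPEC =====
-- Pre_ excludes only the empty list, on which A raises IndexError.
def Pre_helper (nums : List Int) : Prop := nums ≠ []
instance (nums : List Int) : Decidable (Pre_helper nums) := by unfold Pre_helper; infer_instance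
def pvWitness_helper : List Int := [1, -2, 3]

-- On the empty list A raises IndexError (it reads nums[0] before looping); B returns []
-- (made checkable below by helper_raises).
def Raises_helper (nums : List Int) : Prop := nums = []
instance (nums : List Int) : Decidable (Raises_helper nums) := by unfold Raises_helper; infer_instance
def pvRaiseWitness_helper : List Int := []
def pvRaiseWitnessOut_helper : List Int := []

def Spec_helper (nums : List Int) (out : List Int) : Prop := out = helper_alt nums
instance (nums : List Int) (out : List Int) : Decidable (Spec_helper nums out) := by unfold Spec_helper; infer_instance

-- ===== CLAIM (what is proved, stated in full; the proofs are below) =====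
def Claim_equal_helper : Prop := ∀ (nums : List Int), Dom_helper nums → Pre_helper nums → Spec_helper nums (helper nums)
def Claim_raises_helper : Prop := (∀ (nums : List Int), Dom_helper nums → Raises_helper nums → ¬ Pre_helper nums) ∧ (Dom_helper (pvRaiseWitness_helper) ∧ Raises_helper (pvRaiseWitness_helper) ∧ helper_alt (pvRaiseWitness_helper) = pvRaiseWitnessOut_helper)

-- ===== LEMMAS AND PROOFS =====

-- Loop invariant tying A's state (res, cur) to B's state (res, some m, P, mp):
-- cur = P - mp (a clamped running sum equals prefix minus historical min prefix),
-- mp ≤ 0 ∧ mp ≤ P, and the last appended value m bounds cur whenever cur > 0.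
lemma fold_inv : ∀ (l res : List Int) (m cur P mp : Int),
    res.head! = m → cur = P - mp → mp ≤ 0 → mp ≤ P → (0 < cur → cur ≤ m) →
    (l.foldl helperStep (res, cur)).1 = (l.foldl helperAltStep (res, some m, P, mp)).1 := by
  intro l
  induction l with
  | nil => intro res m cur P mp _ _ _ _ _; rfl
  | cons n l ih =>
    intro res m cur P mp hm hcur hmp0 hmpP hbound
    simp only [List.foldl_cons, helperStep, helperAltStep, hm]
    by_cases h : cur + n < 0
    · simp only [if_pos h]
      have hpm : P + n < mp := by omega
      have hkey : max n m = max m (P + n - mp) := by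
        rcases (lt_or_eq_of_le (by omega : (0:Int) ≤ cur)) with hpos | hz
        · have := hbound hpos; simp only [max_def]; split_ifs <;> omega
        · simp only [max_def]; split_ifs <;> omega
      rw [hkey]
      simp only [if_pos hpm]
      exact ih _ _ _ _ _ (by simp) (by omega) (by omega) (by omega) (by omega)
    · simp only [if_neg h]
      have hpm : ¬ (P + n < mp) := by omega
      have hkey : max (cur + n) m = max m (P + n - mp) := by
        rw [max_comm]; congr 1; omega
      rw [hkey]
      simp only [if_neg hpm]
      refine ih _ _ _ _ _ (by simp) (by omega) hmp0 (by omega) ?_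
      intro hpos
      have : cur + n = P + n - mp := by omega
      rw [← hkey]; exact le_max_left _ _

-- ===== VERDICT (by name: the statement is the Claim_ definition above) =====
theorem helper_spec : Claim_equal_helper := by
  intro nums _ hpre
  unfold Spec_helper
  match nums with
  | [] => exact absurd rfl hpre
  | x :: rest =>
    unfold helper helper_alt
    simp only [List.foldl_cons, helperAltStep]
    have h1 : (0 : Int) + x = x := by ring
    rw [show ((0:Int) + x - 0) = x by ring] at *
    congr 1
    have := fold_inv rest [x] x (max x 0) ((0:Int) + x) (if (0:Int) + x < 0 then (0:Int) + x else 0)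
      (by simp) (by split_ifs <;> simp [max_def] <;> omega) (by split_ifs <;> omega)
      (by split_ifs <;> omega) (by intro hp; simp [max_def]; omega)
    exact this

@[simp] theorem helper_raises : Claim_raises_helper := by
  unfold Claim_raises_helper
  exact ⟨fun nums _ hr hp => hp hr, by decide⟩
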